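-- pv_equiv track=rewrite | github.com/traits/mbeex | pytraits/image/region.py | get_kernel_border_coordinates
-- ===== SOURCE A (Python) =====
-- def get_kernel_border_coordinates(d):
--     """
--     Generate coordinate pairs for the border of a `d*d` kernel. `d` must be odd
--     """
--     border = d // 2
--     primitive = list(range(-border, border + 1))
--     return [
--         (x, y)
--         for x in primitive
--         for y in primitive
--         if (abs(x) == border or abs(y) == border)
--     ]
-- ===== SOURCE B (Python) =====
-- def get_kernel_border_coordinates(d):
--     """
--     Generate coordinate pairs for the border of a `d*d` kernel. `d` must be odd
--     """
--     border = d // 2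
--     if border < 0:
--         return []
--     if border == 0:
--         return [(0, 0)]
--     result = [(-border, y) for y in range(-border, border + 1)]
--     for x in range(-border + 1, border):
--         result.append((x, -border))
--         result.append((x, border))
--     result.extend((border, y) for y in range(-border, border + 1))
--     return result
-- ===== Notes on version B (the rewrite author's own statement) =====
-- stated objective: faster
-- what changed: Instead of scanning all d*d cells and filtering for the border, B emits the border directly: one full column at x=-border, two cells per interior x, and one full column at x=border.
import Mathlib
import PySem

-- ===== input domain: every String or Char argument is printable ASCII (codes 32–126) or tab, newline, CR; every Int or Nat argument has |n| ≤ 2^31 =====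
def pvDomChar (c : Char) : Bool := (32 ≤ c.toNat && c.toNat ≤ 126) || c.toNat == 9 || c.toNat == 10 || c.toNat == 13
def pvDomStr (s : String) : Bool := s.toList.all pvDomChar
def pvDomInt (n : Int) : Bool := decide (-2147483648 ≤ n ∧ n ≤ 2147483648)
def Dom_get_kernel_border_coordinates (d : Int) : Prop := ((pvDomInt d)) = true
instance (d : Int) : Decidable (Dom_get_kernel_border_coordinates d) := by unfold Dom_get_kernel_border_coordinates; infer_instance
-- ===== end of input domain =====

-- B emits the border cells directly (O(d) cells) instead of filtering all d*d cells; asymptotically faster, same output.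

-- ===== PORT A =====
def get_kernel_border_coordinates (d : Int) : List (Int × Int) :=
  let border := PySem.Int.floordiv d 2
  let primitive := PySem.List.pyRange (-border) (border + 1) 1
  primitive.flatMap (fun x =>
    (primitive.filter (fun y => decide (|x| = border ∨ |y| = border))).map (fun y => (x, y)))

-- ===== PORT B =====
def get_kernel_border_coordinates_alt (d : Int) : List (Int × Int) :=
  let border := PySem.Int.floordiv d 2
  if border < 0 then []
  else if border = 0 then [(0, 0)]
  else
    (PySem.List.pyRange (-border) (border + 1) 1).map (fun y => (-border, y))
    ++ (PySem.List.pyRange (-border + 1) border 1).flatMap (fun x => [(x, -border), (x, border)])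
    ++ (PySem.List.pyRange (-border) (border + 1) 1).map (fun y => (border, y))

-- ===== PRECONDITION & SPEC =====
def Spec_get_kernel_border_coordinates (d : Int) (out : List (Int × Int)) : Prop := out = get_kernel_border_coordinates_alt d
instance (d : Int) (out : List (Int × Int)) : Decidable (Spec_get_kernel_border_coordinates d out) := by unfold Spec_get_kernel_border_coordinates; infer_instance

-- ===== CLAIM (what is proved, stated in full; the proofs are below) =====
def Claim_equal_get_kernel_border_coordinates : Prop := ∀ (d : Int), Dom_get_kernel_border_coordinates d → Spec_get_kernel_border_coordinates d (get_kernel_border_coordinates d)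

-- ===== LEMMAS AND PROOFS =====

lemma pv_core_eq (b : Int) :
    (PySem.List.pyRange (-b) (b + 1) 1).flatMap (fun x =>
      ((PySem.List.pyRange (-b) (b + 1) 1).filter (fun y => decide (|x| = b ∨ |y| = b))).map (fun y => (x, y)))
    =
    (if b < 0 then ([] : List (Int × Int))
     else if b = 0 then [(0, 0)]
     else
       (PySem.List.pyRange (-b) (b + 1) 1).map (fun y => (-b, y))
       ++ (PySem.List.pyRange (-b + 1) b 1).flatMap (fun x => [(x, -b), (x, b)])
       ++ (PySem.List.pyRange (-b) (b + 1) 1).map (fun y => (b, y))) := by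
  rcases lt_trichotomy b 0 with hb | hb | hb
  · rw [PySem.List.pyRange_one_eq_nil (by omega)]
    simp [hb]
  · subst hb; decide
  · have hneg : ¬ b < 0 := by omega
    have hne : b ≠ 0 := by omega
    have habsn : |(-b)| = b := by rw [abs_neg]; exact abs_of_pos hb
    have habsp : |b| = b := abs_of_pos hb
    have hsplit : PySem.List.pyRange (-b) (b + 1) 1
        = -b :: (PySem.List.pyRange (-b + 1) b 1 ++ [b]) := by
      rw [PySem.List.pyRange_one_succ_right (by omega), PySem.List.pyRange_one_cons (by omega)]
      simp
    have hmid : ∀ x ∈ PySem.List.pyRange (-b + 1) b 1, |x| ≠ b := by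
      intro x hx
      have := (PySem.List.mem_pyRange_one).1 hx
      rcases abs_cases x with ⟨h, _⟩ | ⟨h, _⟩ <;> omega
    have hfilter_border : (PySem.List.pyRange (-b) (b + 1) 1).filter
        (fun y => decide (|y| = b)) = [-b, b] := by
      rw [hsplit]
      simp only [List.filter_cons, List.filter_append, habsn]
      rw [List.filter_eq_nil_iff.2 (by intro y hy; simpa using hmid y hy)]
      simp [habsp]
    simp only [if_neg hneg, if_neg hne]
    rw [hsplit]
    simp only [List.flatMap_cons, List.flatMap_append, List.flatMap_nil]
    have hcol : ∀ x : Int, |x| = b →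
        ((-b :: (PySem.List.pyRange (-b + 1) b 1 ++ [b])).filter
          (fun y => decide (|x| = b ∨ |y| = b))).map (fun y => (x, y))
        = (-b :: (PySem.List.pyRange (-b + 1) b 1 ++ [b])).map (fun y => (x, y)) := by
      intro x hx
      congr 1
      apply List.filter_eq_self.2
      intro y _
      simp [hx]
    have hmidmap : (PySem.List.pyRange (-b + 1) b 1).flatMap (fun x =>
        ((-b :: (PySem.List.pyRange (-b + 1) b 1 ++ [b])).filter
          (fun y => decide (|x| = b ∨ |y| = b))).map (fun y => (x, y)))
        = (PySem.List.pyRange (-b + 1) b 1).flatMap (fun x => [(x, -b), (x, b)]) := by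
      apply List.flatMap_congr
      intro x hx
      have hxb := hmid x hx
      have : (-b :: (PySem.List.pyRange (-b + 1) b 1 ++ [b])).filter
          (fun y => decide (|x| = b ∨ |y| = b))
          = (-b :: (PySem.List.pyRange (-b + 1) b 1 ++ [b])).filter
          (fun y => decide (|y| = b)) := by
        apply List.filter_congr
        intro y _
        simp [hxb]
      rw [this, ← hsplit, hfilter_border]
      simp
    rw [hcol (-b) habsn, hcol b habsp, hmidmap]
    simp [List.append_assoc]

-- ===== VERDICT (by name: the statement is the Claim_ definition above) =====
theorem get_kernel_border_coordinates_spec : Claim_equal_get_kernel_border_coordinates := by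
  intro d _
  show get_kernel_border_coordinates d = get_kernel_border_coordinates_alt d
  simp only [get_kernel_border_coordinates, get_kernel_border_coordinates_alt]
  exact pv_core_eq (PySem.Int.floordiv d 2)
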